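-- pv_equiv track=rewrite | github.com/gji41007/Special-Topics-in-CAD | HW1/checker.py | iter_implicant_minterms
-- ===== SOURCE A (Python) =====
-- def iter_implicant_minterms(impl: str, n_bit: int):
--     if n_bit == 0:
--         yield 0
--         return
--     base_val = 0
--     free_positions = []
--     for i, ch in enumerate(impl):
--         bitpos = n_bit - 1 - i
--         if ch == "1":
--             base_val |= (1 << bitpos)
--         elif ch == "-":
--             free_positions.append(bitpos)
--     free_cnt = len(free_positions)
--     for mask in range(1 << free_cnt):
--         v = base_val
--         m = mask
--         j = 0
--         while j < free_cnt:
--             if m & 1: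
--                 v |= (1 << free_positions[j])
--             m >>= 1
--             j += 1
--         yield v
-- ===== SOURCE B (Python) =====
-- def iter_implicant_minterms(impl: str, n_bit: int):
--     # List-doubling: one pass over impl; each '-' doubles the list of offsets,
--     # so total work is O(len(impl) + 2^k) instead of A's O(k*2^k).
--     if n_bit == 0:
--         yield 0
--         return
--     base = 0
--     vals = [0]
--     for i, ch in enumerate(impl):
--         if ch == "1":
--             base |= 1 << (n_bit - 1 - i)
--         elif ch == "-":
--             bit = 1 << (n_bit - 1 - i)
--             vals += [v | bit for v in vals]
--     for v in vals:
--         yield base | v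
-- ===== Notes on version B (the rewrite author's own statement) =====
-- stated objective: faster
-- what changed: Replaces A's per-mask inner bit-decoding loop (for each of the 2^k masks, rescan all k free positions) with a single list-doubling pass: each '-' character doubles the list of offset values, so every minterm costs amortized O(1).
import Mathlib
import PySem

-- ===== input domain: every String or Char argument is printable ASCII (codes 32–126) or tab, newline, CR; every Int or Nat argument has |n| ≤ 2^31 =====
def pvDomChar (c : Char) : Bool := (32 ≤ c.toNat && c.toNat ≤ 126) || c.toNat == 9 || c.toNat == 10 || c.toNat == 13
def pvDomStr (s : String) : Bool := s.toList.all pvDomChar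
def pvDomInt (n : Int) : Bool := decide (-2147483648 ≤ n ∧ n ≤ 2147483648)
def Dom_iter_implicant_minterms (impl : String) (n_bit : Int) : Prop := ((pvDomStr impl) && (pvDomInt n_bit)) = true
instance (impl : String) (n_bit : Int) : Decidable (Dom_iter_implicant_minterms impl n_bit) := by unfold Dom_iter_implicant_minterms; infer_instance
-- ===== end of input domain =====

-- B replaces A's per-mask inner bit-decoding loop by a single list-doubling pass
-- (each '-' doubles the list of offsets); equivalence of the return value is
-- proved on Pre_ (the inputs where the Python A returns instead of raising).

-- `1 << x` for an Int x, ported as a Nat shift: exact for x ≥ 0 (Pre_ excludes the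
-- inputs where Python reaches `1 << negative` and raises ValueError).
def pvBit (x : Int) : Int := (1 : Int) <<< x.toNat

-- ===== PORT A =====
-- inner `while j < free_cnt` loop of A; fuel = free_cnt - j steps remain.
def pvAWhile (free : List Int) (v m j : Int) (fuel : Nat) : Int :=
  match fuel with
  | 0 => v
  | Nat.succ fuel' =>
    let v' := if PySem.Int.band m 1 ≠ 0
              then PySem.Int.bor v (pvBit (PySem.List.pyGetD free j 0))
              else v
    pvAWhile free v' (m >>> (1 : Nat)) (j + 1) fuel'

-- body of A's first `for i, ch in enumerate(impl)` loop
def pvAStep (n_bit : Int) (st : Int × List Int) (p : Int × Char) : Int × List Int :=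
  let bitpos := n_bit - 1 - p.1
  if p.2 = '1' then (PySem.Int.bor st.1 (pvBit bitpos), st.2)
  else if p.2 = '-' then (st.1, st.2 ++ [bitpos])
  else st

def iter_implicant_minterms (impl : String) (n_bit : Int) : List Int :=
  if n_bit = 0 then [0]
  else
    let st := (PySem.List.enumerate impl.toList 0).foldl (pvAStep n_bit) (0, [])
    (PySem.List.pyRange 0 ((1 : Int) <<< st.2.length) 1).map
      (fun mask => pvAWhile st.2 st.1 mask 0 st.2.length)

-- ===== PORT B =====
-- body of B's single `for i, ch in enumerate(impl)` loop: state = (base, offset list)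
def pvBStep (n_bit : Int) (st : Int × List Int) (p : Int × Char) : Int × List Int :=
  if p.2 = '1' then (PySem.Int.bor st.1 (pvBit (n_bit - 1 - p.1)), st.2)
  else if p.2 = '-' then
    let bit := pvBit (n_bit - 1 - p.1)
    (st.1, st.2 ++ st.2.map (fun v => PySem.Int.bor v bit))
  else st

def iter_implicant_minterms_alt (impl : String) (n_bit : Int) : List Int :=
  if n_bit = 0 then [0]
  else
    let st := (PySem.List.enumerate impl.toList 0).foldl (pvBStep n_bit) (0, [0])
    st.2.map (fun v => PySem.Int.bor st.1 v)

-- ===== PRECONDITION & SPEC =====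
-- Pre_ excludes exactly the inputs on which the Python A raises ValueError
-- (a '1' or '-' character at an index i with n_bit - 1 - i < 0 leads to `1 << negative`).
def Pre_iter_implicant_minterms (impl : String) (n_bit : Int) : Prop :=
  n_bit = 0 ∨ ∀ p ∈ PySem.List.enumerate impl.toList 0, (p.2 = '1' ∨ p.2 = '-') → p.1 < n_bit
instance (impl : String) (n_bit : Int) : Decidable (Pre_iter_implicant_minterms impl n_bit) := by
  unfold Pre_iter_implicant_minterms; infer_instance

def pvWitness_iter_implicant_minterms : String × Int := ("1-0-", 4)

def Spec_iter_implicant_minterms (impl : String) (n_bit : Int) (out : List Int) : Prop := out = iter_implicant_minterms_alt impl n_bit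
instance (impl : String) (n_bit : Int) (out : List Int) : Decidable (Spec_iter_implicant_minterms impl n_bit out) := by unfold Spec_iter_implicant_minterms; infer_instance

-- ===== CLAIM (what is proved, stated in full; the proofs are below) =====
def Claim_equal_iter_implicant_minterms : Prop := ∀ (impl : String) (n_bit : Int), Dom_iter_implicant_minterms impl n_bit → Pre_iter_implicant_minterms impl n_bit → Spec_iter_implicant_minterms impl n_bit (iter_implicant_minterms impl n_bit)

-- ===== LEMMAS AND PROOFS =====

-- the value A's inner while-loop computes, as structural recursion on the position list
def pvLoopVal : List Int → Int → Int → Int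
  | [], v, _ => v
  | p :: ps, v, m =>
      pvLoopVal ps
        (if PySem.Int.band m 1 ≠ 0 then PySem.Int.bor v (pvBit p) else v)
        (m >>> (1 : Nat))

-- B's doubling step / iterated doubling over a list of bit values
def pvStep (acc : List Int) (b : Int) : List Int := acc ++ acc.map (fun v => PySem.Int.bor v b)
def pvSubsets (bs vs : List Int) : List Int := bs.foldl pvStep vs

-- base value accumulated by both first loops
def pvBase (n_bit : Int) (L : List (Int × Char)) (b : Int) : Int :=
  L.foldl (fun acc p => if p.2 = '1' then PySem.Int.bor acc (pvBit (n_bit - 1 - p.1)) else acc) b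
-- bit positions of the '-' characters, in order
def pvPoss (n_bit : Int) (L : List (Int × Char)) : List Int :=
  (L.filter (fun p => decide (p.2 = '-'))).map (fun p => n_bit - 1 - p.1)

lemma pvBit_eq (x : Int) : pvBit x = ((2 ^ x.toNat : Nat) : Int) := by
  unfold pvBit; rw [Int.shiftLeft_eq]; push_cast; ring

lemma pvBit_nonneg (x : Int) : 0 ≤ pvBit x := by
  rw [pvBit_eq]; positivity

lemma pv_shl (k : Nat) : (1 : Int) <<< k = ((2 ^ k : Nat) : Int) := by
  rw [Int.shiftLeft_eq]; push_cast; ring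

lemma pv_range_shl (k : Nat) :
    PySem.List.pyRange 0 ((1 : Int) <<< k) 1 = (List.range (2 ^ k)).map (fun j : Nat => (j : Int)) := by
  rw [PySem.List.pyRange_one, pv_shl,
      show (((2 ^ k : Nat) : Int) - 0) = ((2 ^ k : Nat) : Int) from by ring, Int.toNat_natCast]
  simp

lemma pv_shr (n : Nat) : ((n : Int) >>> (1 : Nat)) = ((n / 2 : Nat) : Int) := by
  rw [Int.shiftRight_eq_div_pow, show ((2 : Nat) ^ 1) = 2 from rfl]
  omega

lemma pv_band1 (n : Nat) : PySem.Int.band (n : Int) 1 = ((n % 2 : Nat) : Int) := by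
  have h := PySem.Int.band_natCast n 1
  simpa [Nat.and_one_is_mod] using h

lemma pv_bor_nonneg {a b : Int} (ha : 0 ≤ a) (hb : 0 ≤ b) : 0 ≤ PySem.Int.bor a b := by
  rw [PySem.Int.bor_of_nonneg ha hb]; exact Int.natCast_nonneg _

lemma pv_bor_assoc {a b c : Int} (ha : 0 ≤ a) (hb : 0 ≤ b) (hc : 0 ≤ c) :
    PySem.Int.bor (PySem.Int.bor a b) c = PySem.Int.bor a (PySem.Int.bor b c) := by
  rw [PySem.Int.bor_of_nonneg ha hb, PySem.Int.bor_of_nonneg hb hc,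
      PySem.Int.bor_of_nonneg (Int.natCast_nonneg _) hc,
      PySem.Int.bor_of_nonneg ha (Int.natCast_nonneg _)]
  simp [Nat.lor_assoc]

-- A's first loop computes (base, accumulated free positions)
lemma pv_afold (n_bit : Int) (L : List (Int × Char)) : ∀ (b : Int) (fs : List Int),
    L.foldl (pvAStep n_bit) (b, fs) = (pvBase n_bit L b, fs ++ pvPoss n_bit L) := by
  induction L with
  | nil => intro b fs; simp [pvBase, pvPoss]
  | cons p L ih =>
    intro b fs
    by_cases h1 : p.2 = '1'
    · simp [pvAStep, pvBase, pvPoss, h1, ih]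
    · by_cases h2 : p.2 = '-'
      · simp [pvAStep, pvBase, pvPoss, h2, ih]
      · simp [pvAStep, pvBase, pvPoss, h1, h2, ih]

-- B's loop computes (base, doubling of the '-' bits applied to the start list)
lemma pv_bfold (n_bit : Int) (L : List (Int × Char)) : ∀ (b : Int) (vs : List Int),
    L.foldl (pvBStep n_bit) (b, vs)
      = (pvBase n_bit L b, pvSubsets ((pvPoss n_bit L).map pvBit) vs) := by
  induction L with
  | nil => intro b vs; simp [pvBase, pvPoss, pvSubsets]
  | cons p L ih =>
    intro b vs
    by_cases h1 : p.2 = '1'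
    · simp [pvBStep, pvBase, pvPoss, h1, ih]
    · by_cases h2 : p.2 = '-'
      · simp [pvBStep, pvBase, pvPoss, pvSubsets, pvStep, h2, ih]
      · simp [pvBStep, pvBase, pvPoss, h1, h2, ih]

-- the indexed while-loop equals the structural recursion
lemma pv_awhile_eq (qs : List Int) : ∀ (pre : List Int) (v m : Int),
    pvAWhile (pre ++ qs) v m (pre.length : Int) qs.length = pvLoopVal qs v m := by
  induction qs with
  | nil => intro pre v m; simp [pvAWhile, pvLoopVal]
  | cons q qs ih =>
    intro pre v m
    have hget : PySem.List.pyGetD (pre ++ q :: qs) (pre.length : Int) 0 = q := by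
      rw [PySem.List.pyGetD_natCast]
      simp
    have hsplit : pre ++ q :: qs = (pre ++ [q]) ++ qs := by simp
    simp only [pvAWhile, pvLoopVal, List.length_cons, hget]
    have hlen : (pre.length : Int) + 1 = (((pre ++ [q]).length : Nat) : Int) := by
      simp
    rw [hsplit, hlen, ih]

-- last free position: low masks leave it alone …
lemma pv_loopVal_last (p : Int) (ps : List Int) : ∀ (v : Int) (j : Nat), j < 2 ^ ps.length →
    pvLoopVal (ps ++ [p]) v (j : Int) = pvLoopVal ps v (j : Int) := by
  induction ps with
  | nil =>
    intro v j hj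
    have hj0 : j = 0 := by simpa using hj
    subst hj0
    simp [pvLoopVal, show PySem.Int.band (0 : Int) 1 = 0 from by decide]
  | cons q ps ih =>
    intro v j hj
    simp only [List.length_cons] at hj
    have hpow : 2 ^ (ps.length + 1) = 2 * 2 ^ ps.length := by ring
    have hj2 : j / 2 < 2 ^ ps.length := by omega
    simp only [List.cons_append, pvLoopVal, pv_shr, pv_band1]
    exact ih _ _ hj2

-- … and high masks OR in its bit at the end
lemma pv_loopVal_last_hi (p : Int) (ps : List Int) : ∀ (v : Int) (j : Nat), j < 2 ^ ps.length →
    pvLoopVal (ps ++ [p]) v ((2 ^ ps.length + j : Nat) : Int)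
      = PySem.Int.bor (pvLoopVal ps v (j : Int)) (pvBit p) := by
  induction ps with
  | nil =>
    intro v j hj
    have hj0 : j = 0 := by simpa using hj
    subst hj0
    simp [pvLoopVal]
  | cons q ps ih =>
    intro v j hj
    simp only [List.length_cons] at hj
    have hpow : 2 ^ (ps.length + 1) = 2 * 2 ^ ps.length := by ring
    have hpar : (2 ^ (ps.length + 1) + j) % 2 = j % 2 := by omega
    have hdiv : (2 ^ (ps.length + 1) + j) / 2 = 2 ^ ps.length + j / 2 := by omega
    have hj2 : j / 2 < 2 ^ ps.length := by omega
    simp only [List.cons_append, pvLoopVal, List.length_cons, pv_shr, pv_band1, hpar, hdiv]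
    exact ih _ _ hj2

-- every element produced by the doubling is nonnegative
lemma pv_subsets_nonneg (bs : List Int) : ∀ (vs : List Int), (∀ b ∈ bs, 0 ≤ b) → (∀ v ∈ vs, 0 ≤ v) →
    ∀ x ∈ pvSubsets bs vs, 0 ≤ x := by
  induction bs with
  | nil => intro vs _ hvs x hx; exact hvs x hx
  | cons b bs ih =>
    intro vs hbs hvs x hx
    refine ih (pvStep vs b) (fun b' hb' => hbs b' (List.mem_cons_of_mem _ hb')) ?_ x hx
    intro v hv
    rcases List.mem_append.mp hv with h | h
    · exact hvs v h
    · rcases List.mem_map.mp h with ⟨w, hw, rfl⟩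
      exact pv_bor_nonneg (hvs w hw) (hbs b (by simp))

-- MAIN: A's mask sweep equals base OR'ed over B's doubling list
lemma pv_main (ps : List Int) (base : Int) (hb : 0 ≤ base) :
    (List.range (2 ^ ps.length)).map (fun j : Nat => pvLoopVal ps base (j : Int))
      = (pvSubsets (ps.map pvBit) [0]).map (fun v => PySem.Int.bor base v) := by
  induction ps using List.reverseRecOn with
  | nil => simp [pvLoopVal, pvSubsets]
  | append_singleton ps p ih =>
    have hsub : ∀ x ∈ pvSubsets (ps.map pvBit) [0], 0 ≤ x := by
      refine pv_subsets_nonneg _ _ ?_ ?_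
      · intro b hbm; rcases List.mem_map.mp hbm with ⟨q, _, rfl⟩; exact pvBit_nonneg _
      · intro v hv; simp at hv; omega
    have hlen : (ps ++ [p]).length = ps.length + 1 := by simp
    have hpow : 2 ^ (ps.length + 1) = 2 ^ ps.length + 2 ^ ps.length := by ring
    rw [hlen, hpow, List.range_add, List.map_append, List.map_map]
    have h1 : (List.range (2 ^ ps.length)).map (fun j : Nat => pvLoopVal (ps ++ [p]) base (j : Int))
        = (List.range (2 ^ ps.length)).map (fun j : Nat => pvLoopVal ps base (j : Int)) := by
      refine List.map_congr_left ?_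
      intro j hj
      exact pv_loopVal_last p ps base j (List.mem_range.mp hj)
    have h2 : (List.range (2 ^ ps.length)).map
          ((fun j : Nat => pvLoopVal (ps ++ [p]) base (j : Int)) ∘ (fun j : Nat => 2 ^ ps.length + j))
        = (List.range (2 ^ ps.length)).map
            (fun j : Nat => PySem.Int.bor (pvLoopVal ps base (j : Int)) (pvBit p)) := by
      refine List.map_congr_left ?_
      intro j hj
      simp only [Function.comp_apply]
      exact pv_loopVal_last_hi p ps base j (List.mem_range.mp hj)
    rw [h1, h2]
    have h3 : (List.range (2 ^ ps.length)).map
          (fun j : Nat => PySem.Int.bor (pvLoopVal ps base (j : Int)) (pvBit p))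
        = ((List.range (2 ^ ps.length)).map (fun j : Nat => pvLoopVal ps base (j : Int))).map
            (fun v => PySem.Int.bor v (pvBit p)) := by
      rw [List.map_map]; rfl
    rw [h3, ih]
    have h4 : pvSubsets ((ps ++ [p]).map pvBit) [0]
        = pvStep (pvSubsets (ps.map pvBit) [0]) (pvBit p) := by
      simp [pvSubsets]
    rw [h4]
    simp only [pvStep, List.map_append, List.map_map]
    congr 1
    refine List.map_congr_left ?_
    intro x hx
    simp only [Function.comp_apply]
    exact pv_bor_assoc hb (hsub x hx) (pvBit_nonneg p)

lemma pv_base_nonneg (n_bit : Int) (L : List (Int × Char)) : ∀ (b : Int), 0 ≤ b →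
    0 ≤ pvBase n_bit L b := by
  induction L with
  | nil => intro b hb; simpa [pvBase] using hb
  | cons p L ih =>
    intro b hb
    by_cases h1 : p.2 = '1'
    · simp only [pvBase, List.foldl_cons, h1]
      exact ih _ (pv_bor_nonneg hb (pvBit_nonneg _))
    · simp only [pvBase, List.foldl_cons, h1]
      exact ih _ hb

-- ===== VERDICT (by name: the statement is the Claim_ definition above) =====
theorem iter_implicant_minterms_spec : Claim_equal_iter_implicant_minterms := by
  intro impl n_bit _ _
  unfold Spec_iter_implicant_minterms iter_implicant_minterms iter_implicant_minterms_alt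
  by_cases h0 : n_bit = 0
  · simp [h0]
  · rw [if_neg h0, if_neg h0]
    simp only [pv_afold, pv_bfold, List.nil_append]
    rw [pv_range_shl, List.map_map]
    refine Eq.trans (List.map_congr_left ?_)
      (pv_main _ _ (pv_base_nonneg n_bit (PySem.List.enumerate impl.toList 0) 0 le_rfl))
    intro j hj
    simpa using pv_awhile_eq (pvPoss n_bit (PySem.List.enumerate impl.toList 0)) []
      (pvBase n_bit (PySem.List.enumerate impl.toList 0) 0) (j : Int)
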